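-- pv_equiv track=rewrite | github.com/WhiteNight123/SICP | hw03-Code/hw03.py | helper
-- ===== SOURCE A (Python) =====
-- def number_of_six(n):
--     """Return the number of 6 in each digit of a positive integer n.
--
--     >>> number_of_six(666)
--     3
--     >>> number_of_six(123456)
--     1
--     >>> from construct_check import check
--     >>> # ban all assignment statements
--     >>> check(HW_SOURCE_FILE, 'number_of_six',
--     ...       ['Assign', 'AugAssign'])
--     True
--     """
--     "*** YOUR CODE HERE ***"
--     if n < 6:
--         return 0
--     if n % 10 == 6:
--         return number_of_six(n // 10) + 1
--     else:
--         return number_of_six(n // 10)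
--
-- def helper(n, i, curr, direction):
--     if i == n:
--         return curr
--     else:
--         if i % 6 == 0 or number_of_six(i) > 0:
--             return helper(n, i + 1, curr - direction, - direction)
--         else:
--             return helper(n, i + 1, curr + direction, direction)
-- ===== SOURCE B (Python) =====
-- def has_six(m):
--     while m >= 6:
--         if m % 10 == 6:
--             return True
--         m //= 10
--     return False
--
-- def helper(n, i, curr, direction):
--     # accumulate a unit-direction total, factoring the initial direction out
--     sign, total = 1, 0
--     for k in range(i, n):
--         if k % 6 == 0 or has_six(k):
--             total -= sign
--             sign = -sign
--         else:
--             total += sign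
--     return curr + direction * total
-- ===== Notes on version B (the rewrite author's own statement) =====
-- stated objective: alternative
-- what changed: B factors the initial direction out: a for-loop over range(i, n) accumulates a unit-sign (sign, total) pair and returns curr + direction * total, instead of A's recursion threading curr and direction; the digit counter becomes an early-exit boolean scan.
import Mathlib
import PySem

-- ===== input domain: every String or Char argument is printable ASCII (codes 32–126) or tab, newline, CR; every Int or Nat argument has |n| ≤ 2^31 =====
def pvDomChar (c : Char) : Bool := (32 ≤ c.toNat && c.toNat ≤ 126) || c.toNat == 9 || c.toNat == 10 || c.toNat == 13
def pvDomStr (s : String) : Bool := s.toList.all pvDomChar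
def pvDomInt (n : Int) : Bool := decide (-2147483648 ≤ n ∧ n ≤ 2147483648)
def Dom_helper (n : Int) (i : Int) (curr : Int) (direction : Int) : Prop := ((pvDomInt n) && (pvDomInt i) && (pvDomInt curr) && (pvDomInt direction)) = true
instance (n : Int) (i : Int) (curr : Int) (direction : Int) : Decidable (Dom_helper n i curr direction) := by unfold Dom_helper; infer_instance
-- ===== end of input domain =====

-- B factors the initial direction out: a foldl over range(i, n) accumulates a unit-sign
-- (sign, total) pair and returns curr + direction * total, instead of A's recursion
-- threading curr and direction; digit counting becomes an early-exit boolean scan.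
-- Alternative decomposition, same cost.


-- ===== PORT A =====
-- number_of_six, A's recursive digit counter
def number_of_six (n : Int) : Int :=
  if h : n < 6 then 0
  else if PySem.Int.mod n 10 = 6 then number_of_six (PySem.Int.floordiv n 10) + 1
  else number_of_six (PySem.Int.floordiv n 10)
termination_by n.toNat
decreasing_by
  all_goals
    have h10 : PySem.Int.floordiv n 10 = n / 10 := PySem.Int.floordiv_eq_ediv_of_pos (by omega)
    rw [h10]; omega

-- A's recursion; fuel = n - i makes the port total (Python diverges when i > n, outside Pre_)
def helperGo (fuel : Nat) (n : Int) (i : Int) (curr : Int) (direction : Int) : Int :=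
  match fuel with
  | 0 => curr
  | f + 1 =>
    if i = n then curr
    else if PySem.Int.mod i 6 = 0 ∨ number_of_six i > 0 then
      helperGo f n (i + 1) (curr - direction) (-direction)
    else
      helperGo f n (i + 1) (curr + direction) direction

def helper (n : Int) (i : Int) (curr : Int) (direction : Int) : Int :=
  helperGo (n - i).toNat n i curr direction

-- ===== PORT B =====
-- B's early-exit boolean digit scan (while m >= 6)
def has_six (m : Int) : Bool :=
  if h : 6 ≤ m then
    if PySem.Int.mod m 10 = 6 then true
    else has_six (PySem.Int.floordiv m 10)
  else false
termination_by m.toNat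
decreasing_by
  have h10 : PySem.Int.floordiv m 10 = m / 10 := PySem.Int.floordiv_eq_ediv_of_pos (by omega)
  rw [h10]; omega

-- one iteration of B's for-loop body, on the (sign, total) state
def flipStep (st : Int × Int) (k : Int) : Int × Int :=
  if PySem.Int.mod k 6 = 0 ∨ has_six k then (-st.1, st.2 - st.1) else (st.1, st.2 + st.1)

-- B: for k in range(i, n): update (sign, total); return curr + direction * total
def helper_alt (n : Int) (i : Int) (curr : Int) (direction : Int) : Int :=
  curr + direction * ((PySem.List.pyRange i n 1).foldl flipStep (1, 0)).2

-- ===== PRECONDITION & SPEC =====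
-- A recurses from i towards n, so it returns only when i ≤ n (otherwise RecursionError).
def Pre_helper (n : Int) (i : Int) (curr : Int) (direction : Int) : Prop := i ≤ n
instance (n : Int) (i : Int) (curr : Int) (direction : Int) : Decidable (Pre_helper n i curr direction) := by unfold Pre_helper; infer_instance
def pvWitness_helper : Int × Int × Int × Int := (10, 1, 0, 1)

def Spec_helper (n : Int) (i : Int) (curr : Int) (direction : Int) (out : Int) : Prop := out = helper_alt n i curr direction
instance (n : Int) (i : Int) (curr : Int) (direction : Int) (out : Int) : Decidable (Spec_helper n i curr direction out) := by unfold Spec_helper; infer_instance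

-- ===== CLAIM (what is proved, stated in full; the proofs are below) =====
def Claim_equal_helper : Prop := ∀ (n : Int) (i : Int) (curr : Int) (direction : Int), Dom_helper n i curr direction → Pre_helper n i curr direction → Spec_helper n i curr direction (helper n i curr direction)

-- ===== LEMMAS AND PROOFS =====

lemma number_of_six_nonneg (n : Int) : 0 ≤ number_of_six n := by
  induction n using number_of_six.induct with
  | case1 n h => rw [number_of_six, dif_pos h]
  | case2 n h h6 ih => rw [number_of_six, dif_neg h, if_pos h6]; omega
  | case3 n h h6 ih => rw [number_of_six, dif_neg h, if_neg h6]; exact ih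

lemma has_six_eq (n : Int) : (number_of_six n > 0) ↔ has_six n = true := by
  induction n using number_of_six.induct with
  | case1 n h =>
    rw [number_of_six, dif_pos h, has_six, dif_neg (by omega)]
    simp
  | case2 n h h6 ih =>
    rw [number_of_six, dif_neg h, if_pos h6, has_six, dif_pos (by omega), if_pos h6]
    have := number_of_six_nonneg (PySem.Int.floordiv n 10)
    constructor
    · intro _; rfl
    · intro _; omega
  | case3 n h h6 ih =>
    rw [number_of_six, dif_neg h, if_neg h6, has_six, dif_pos (by omega), if_neg h6]
    exact ih

-- loop invariant: A's threaded (curr, direction) is (c + d*t, d*s) for B's (sign, total) state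
lemma go_eq (fuel : Nat) : ∀ (n i : Int), fuel = (n - i).toNat → i ≤ n →
    ∀ (s t c d : Int),
    helperGo fuel n i (c + d * t) (d * s) =
      c + d * ((PySem.List.pyRange i n 1).foldl flipStep (s, t)).2 := by
  induction fuel with
  | zero =>
    intro n i hf hle s t c d
    have hin : i = n := by omega
    subst hin
    simp [helperGo]
  | succ f ih =>
    intro n i hf hle s t c d
    have hlt : i < n := by omega
    rw [PySem.List.pyRange_one_cons hlt]
    rw [helperGo, if_neg (by omega)]
    simp only [List.foldl_cons]
    by_cases hc : PySem.Int.mod i 6 = 0 ∨ number_of_six i > 0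
    · have hc' : PySem.Int.mod i 6 = 0 ∨ has_six i = true := by
        rcases hc with h | h
        · exact Or.inl h
        · exact Or.inr ((has_six_eq i).mp h)
      rw [if_pos hc]
      rw [show flipStep (s, t) i = (-s, t - s) from by simp only [flipStep]; rw [if_pos hc']]
      have e1 : c + d * t - d * s = c + d * (t - s) := by ring
      have e2 : -(d * s) = d * (-s) := by ring
      rw [e1, e2]
      exact ih n (i + 1) (by omega) (by omega) (-s) (t - s) c d
    · have hc' : ¬ (PySem.Int.mod i 6 = 0 ∨ has_six i = true) := by
        rintro (h | h)
        · exact hc (Or.inl h)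
        · exact hc (Or.inr ((has_six_eq i).mpr h))
      rw [if_neg hc]
      rw [show flipStep (s, t) i = (s, t + s) from by simp only [flipStep]; rw [if_neg hc']]
      have e1 : c + d * t + d * s = c + d * (t + s) := by ring
      rw [e1]
      exact ih n (i + 1) (by omega) (by omega) s (t + s) c d

-- ===== VERDICT (by name: the statement is the Claim_ definition above) =====
theorem helper_spec : Claim_equal_helper := by
  intro n i curr direction _ hpre
  unfold Spec_helper helper helper_alt
  have := go_eq (n - i).toNat n i rfl hpre 1 0 curr direction
  simpa using this
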